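-- pv_equiv track=rewrite | github.com/cynthiajma/designanalysisofalgs | least_red.py | least_red
-- ===== SOURCE A (Python) =====
-- def build_adj_list(n, edges):
--     graph = [[] for _ in range(n)]
--     for u,v in edges:
--         graph[u].append(v)
--         graph[v].append(u)
--     return graph
--
-- def dfs(vertex: int, current_color: bool, color, graph, count, component) -> bool:
--     color[vertex] = current_color # assign color to current
--     component.append(vertex)
--     if current_color:
--         count[0] += 1
--     else:
--         count[1] += 1
--     for neighbor in graph[vertex]:
--         if color[neighbor] is None:
--             if not dfs(neighbor, not current_color, color, graph, count, component): # opposite coloring returns False?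
--                 return False
--         elif color[neighbor] == current_color:
--             return False # there is a conflict
--     return True
--
-- def least_red(n:int, edges:list[(int, int)]) -> list[bool]:
--     graph_adjlist = build_adj_list(n, edges)
--     color = [None] * n
--     # perform dfs to color the graph:
--     for i in range(n):
--         if color[i] is None: # new component
--             count = [0,0]
--             component = []
--             if not dfs(i, False, color, graph_adjlist, count, component): # meaning that there is no valid coloring
--                 return None
--         if count[0] > count[1]: # only flip the color in the component
--                 for node in component:
--                     color[node] = not color[node]
--
--     return color
-- ===== SOURCE B (Python) =====
-- def least_red(n: int, edges: list[(int, int)]) -> list[bool]: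
--     graph = [[] for _ in range(n)]
--     for u, v in edges:
--         graph[u].append(v)
--         graph[v].append(u)
--     color = [None] * n
--     count = [0, 0]
--     component = []
--     for i in range(n):
--         if color[i] is None:  # new component: iterative DFS with an explicit frame stack
--             count = [0, 0]
--             component = [i]
--             color[i] = False
--             count[1] += 1
--             stack = [(i, False, 0)]  # (vertex, its color, next neighbor position)
--             ok = True
--             while stack:
--                 v0, c, j = stack.pop()
--                 if j < len(graph[v0]):
--                     stack.append((v0, c, j + 1))
--                     nb = graph[v0][j]
--                     if color[nb] is None:
--                         color[nb] = not c
--                         component.append(nb)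
--                         if not c:
--                             count[0] += 1
--                         else:
--                             count[1] += 1
--                         stack.append((nb, not c, 0))
--                     elif color[nb] == c:
--                         ok = False
--                         break
--             if not ok:
--                 return None
--         if count[0] > count[1]:
--             for node in component:
--                 color[node] = not color[node]
--     return color
-- ===== Notes on version B (the rewrite author's own statement) =====
-- stated objective: alternative
-- what changed: The recursive dfs is replaced by an iterative depth-first traversal with an explicit stack of (vertex, color, next-neighbor-position) frames; the outer loop, including the persistent count/component flip quirk, is kept identical.
import Mathlib
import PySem

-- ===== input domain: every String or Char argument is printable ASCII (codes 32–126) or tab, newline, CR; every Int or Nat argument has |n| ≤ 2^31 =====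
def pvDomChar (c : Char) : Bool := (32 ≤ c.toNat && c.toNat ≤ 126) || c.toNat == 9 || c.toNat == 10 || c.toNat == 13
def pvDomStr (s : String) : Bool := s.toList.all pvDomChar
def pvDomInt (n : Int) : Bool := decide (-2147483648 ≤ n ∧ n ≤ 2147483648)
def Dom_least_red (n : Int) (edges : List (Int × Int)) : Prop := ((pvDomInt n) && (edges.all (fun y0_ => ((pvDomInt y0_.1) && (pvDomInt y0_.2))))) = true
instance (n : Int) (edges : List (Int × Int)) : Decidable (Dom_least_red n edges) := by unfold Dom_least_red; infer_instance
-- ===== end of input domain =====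

-- B replaces A's recursive dfs with an explicit-stack iterative traversal (same visit order, no
-- recursion); an alternative of the same cost.  The equivalence proved is about the return value.

-- traversal state: (color list, (count_true, count_false), component)
abbrev PvSt : Type := List (Option Bool) × (Int × Int) × List Int

-- ===== PORT A =====
def buildAdj (n : Int) (edges : List (Int × Int)) : List (List Int) :=
  edges.foldl (fun g e =>
    let g1 := PySem.List.pySetD g e.1 (PySem.List.pyGetD g e.1 [] ++ [e.2])
    PySem.List.pySetD g1 e.2 (PySem.List.pyGetD g1 e.2 [] ++ [e.1]))
    (List.replicate n.toNat [])

mutual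
-- dfs(vertex, current_color, …): colors the vertex, then walks its neighbors (loopA is the for-loop)
def dfsA (f : Nat) (v : Int) (c : Bool) (g : List (List Int)) (st : PvSt) : Bool × PvSt :=
  match f with
  | 0 => (false, st)  -- fuel exhaustion: unreachable (recursion depth ≤ number of uncolored vertices)
  | f' + 1 =>
    loopA f' v c g (PySem.List.pyGetD g v [])
      (PySem.List.pySetD st.1 v (some c),
       (if c then (st.2.1.1 + 1, st.2.1.2) else (st.2.1.1, st.2.1.2 + 1)),
       st.2.2 ++ [v])
termination_by (f, 0, 0)
decreasing_by
  exact Prod.Lex.left _ _ (Nat.lt_succ_self _)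

def loopA (f : Nat) (v : Int) (c : Bool) (g : List (List Int)) (ns : List Int) (st : PvSt) : Bool × PvSt :=
  match ns with
  | [] => (true, st)
  | nb :: rest =>
    match PySem.List.pyGet? st.1 nb with
    | some none =>
      let r := dfsA f nb (!c) g st
      if r.1 then loopA f v c g rest r.2 else (false, r.2)
    | some (some b) => if b = c then (false, st) else loopA f v c g rest st
    | none => (false, st)  -- IndexError (neighbor out of range): unreachable under Pre_
termination_by (f, 1, ns.length)
decreasing_by
  · exact Prod.Lex.right _ (Prod.Lex.left _ _ Nat.zero_lt_one)
  · exact Prod.Lex.right _ (Prod.Lex.right _ (Nat.lt_succ_self _))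
  · exact Prod.Lex.right _ (Prod.Lex.right _ (Nat.lt_succ_self _))
end

-- 'for node in component: color[node] = not color[node]'
def flipA (color : List (Option Bool)) (comp : List Int) : List (Option Bool) :=
  comp.foldl (fun col node =>
    PySem.List.pySetD col node (some (!((PySem.List.pyGetD col node none).getD false)))) color

-- 'if count[0] > count[1]: …' (runs on every i, with the persistent count/component)
def flipStepA (st : PvSt) : PvSt :=
  if st.2.1.1 > st.2.1.2 then (flipA st.1 st.2.2, st.2.1, st.2.2) else st

-- loop body of 'for i in range(n)'
def stepA (g : List (List Int)) (fuel : Nat) (acc : Bool × PvSt) (i : Int) : Bool × PvSt :=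
  if acc.1 then
    let r :=
      match PySem.List.pyGet? acc.2.1 i with
      | some none => dfsA fuel i false g (acc.2.1, (0, 0), [])
      | some (some _) => (true, acc.2)
      | none => (false, acc.2)  -- IndexError: unreachable (i ∈ range(n), len(color) = n)
    if r.1 then (true, flipStepA r.2) else (false, r.2)
  else acc

def least_red (n : Int) (edges : List (Int × Int)) : Option (List Bool) :=
  let g := buildAdj n edges
  let fin := (PySem.List.pyRange 0 n 1).foldl (stepA g (n.toNat + 1))
    (true, (List.replicate n.toNat none, (0, 0), []))
  if fin.1 then some (fin.2.1.map (fun o => o.getD false)) else none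

-- ===== PORT B =====
-- adjacency list built by recursion over the edge list
def adjB : List (List Int) → List (Int × Int) → List (List Int)
  | g, [] => g
  | g, (u, v) :: rest =>
    let g1 := PySem.List.pySetD g u (PySem.List.pyGetD g u [] ++ [v])
    let g2 := PySem.List.pySetD g1 v (PySem.List.pyGetD g1 v [] ++ [u])
    adjB g2 rest

def pvNoneCnt (l : List (Option Bool)) : Nat := l.countP (fun o => o.isNone)

def pvFrameW (g : List (List Int)) (fr : Int × Bool × Nat) : Nat :=
  ((PySem.List.pyGetD g fr.1 []).length - fr.2.2) + 1

def pvStackW (g : List (List Int)) (stack : List (Int × Bool × Nat)) : Nat :=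
  (stack.map (pvFrameW g)).sum

-- lemmas the stack machine's termination argument cites
theorem pv_get_set (l : List (Option Bool)) (i : Int) (a : Option Bool)
    (h : PySem.List.pyGet? l i = some a) :
    ∃ k, ∃ hk : k < l.length, l[k] = a ∧ ∀ v, PySem.List.pySetD l i v = l.set k v := by
  unfold PySem.List.pyGet? PySem.List.pyIdx? at h
  unfold PySem.List.pySetD PySem.List.pySet? PySem.List.pyIdx?
  split_ifs at h with h1 h2 h3
  · simp only [Option.bind] at h
    rw [List.getElem?_eq_some_iff] at h
    obtain ⟨hlt, heq⟩ := h
    refine ⟨i.toNat, hlt, heq, ?_⟩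
    intro v; simp [h1, h2]
  · exact absurd h (by simp [Option.bind])
  · simp only [Option.bind] at h
    rw [List.getElem?_eq_some_iff] at h
    obtain ⟨hlt, heq⟩ := h
    refine ⟨l.length - (-i).toNat, hlt, heq, ?_⟩
    intro v; simp [h1, h3]
  · exact absurd h (by simp [Option.bind])

theorem pv_noneCnt_get_none (l : List (Option Bool)) (i : Int)
    (h : PySem.List.pyGet? l i = some none) (x : Bool) :
    pvNoneCnt (PySem.List.pySetD l i (some x)) + 1 = pvNoneCnt l := by
  obtain ⟨k, hk, hget, hset⟩ := pv_get_set l i none h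
  rw [hset]
  unfold pvNoneCnt
  rw [List.countP_set hk]
  simp [hget]
  have : 1 ≤ l.countP (fun o => o.isNone) := by
    have := List.countP_pos_iff (p := fun (o : Option Bool) => o.isNone) (l := l)
    exact this.mpr ⟨none, by rw [← hget]; exact List.getElem_mem hk, rfl⟩
  omega


-- the 'while stack:' loop: frames are (vertex, its color, next neighbor position)
def runB (g : List (List Int)) (stack : List (Int × Bool × Nat)) (st : PvSt) : Bool × PvSt :=
  match stack with
  | [] => (true, st)
  | (v, c, j) :: rest =>
    let ns := PySem.List.pyGetD g v []
    if hj : j < ns.length then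
      match hcg : PySem.List.pyGet? st.1 ns[j] with
      | some none =>
        runB g ((ns[j], !c, 0) :: (v, c, j + 1) :: rest)
          (PySem.List.pySetD st.1 ns[j] (some (!c)),
           (if !c then (st.2.1.1 + 1, st.2.1.2) else (st.2.1.1, st.2.1.2 + 1)),
           st.2.2 ++ [ns[j]])
      | some (some b) => if b = c then (false, st) else runB g ((v, c, j + 1) :: rest) st
      | none => (false, st)  -- IndexError (neighbor out of range): unreachable under Pre_
    else runB g rest st
termination_by (pvNoneCnt st.1, pvStackW g stack)
decreasing_by
  · exact Prod.Lex.left _ _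
      (by have := pv_noneCnt_get_none st.1 ((PySem.List.pyGetD g v [])[j]) hcg (!c); omega)
  · apply Prod.Lex.right
    have hj' : j < (PySem.List.pyGetD g v []).length := hj
    simp [pvStackW, pvFrameW]; omega
  · apply Prod.Lex.right
    simp [pvStackW, pvFrameW]

def flipB : List Int → List (Option Bool) → List (Option Bool)
  | [], col => col
  | node :: rest, col =>
    flipB rest (PySem.List.pySetD col node (some (!((PySem.List.pyGetD col node none).getD false))))

def flipStepB (st : PvSt) : PvSt :=
  if st.2.1.1 > st.2.1.2 then (flipB st.2.2 st.1, st.2.1, st.2.2) else st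

def stepB (g : List (List Int)) (acc : Bool × PvSt) (i : Int) : Bool × PvSt :=
  if acc.1 then
    let r :=
      match PySem.List.pyGet? acc.2.1 i with
      | some none =>
        runB g [(i, false, 0)]
          (PySem.List.pySetD acc.2.1 i (some false), (0, 1), [i])
      | some (some _) => (true, acc.2)
      | none => (false, acc.2)  -- IndexError: unreachable
    if r.1 then (true, flipStepB r.2) else (false, r.2)
  else acc

def outerB (g : List (List Int)) : List Int → Bool × PvSt → Bool × PvSt
  | [], acc => acc
  | i :: is, acc => outerB g is (stepB g acc i)

def least_red_alt (n : Int) (edges : List (Int × Int)) : Option (List Bool) :=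
  let g := adjB (List.replicate n.toNat []) edges
  let fin := outerB g (PySem.List.pyRange 0 n 1)
    (true, (List.replicate n.toNat none, (0, 0), []))
  if fin.1 then some (fin.2.1.map (fun o => o.getD false)) else none

-- ===== PRECONDITION & SPEC =====
-- Pre_ excludes exactly the inputs on which Python A raises IndexError: an edge endpoint
-- outside [-n, n) (negative endpoints down to -n index from the end and are admitted).
def Pre_least_red (n : Int) (edges : List (Int × Int)) : Prop :=
  ∀ e ∈ edges, -n ≤ e.1 ∧ e.1 < n ∧ -n ≤ e.2 ∧ e.2 < n
instance (n : Int) (edges : List (Int × Int)) : Decidable (Pre_least_red n edges) := by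
  unfold Pre_least_red; infer_instance

def pvWitness_least_red : Int × (List (Int × Int)) := (4, [(0, 1), (1, 2), (2, 3)])

def Spec_least_red (n : Int) (edges : List (Int × Int)) (out : Option (List Bool)) : Prop := out = least_red_alt n edges
instance (n : Int) (edges : List (Int × Int)) (out : Option (List Bool)) : Decidable (Spec_least_red n edges out) := by unfold Spec_least_red; infer_instance

-- ===== CLAIM (what is proved, stated in full; the proofs are below) =====
def Claim_equal_least_red : Prop := ∀ (n : Int) (edges : List (Int × Int)), Dom_least_red n edges → Pre_least_red n edges → Spec_least_red n edges (least_red n edges)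

-- ===== LEMMAS AND PROOFS =====

theorem pv_noneCnt_setD_le (l : List (Option Bool)) (i : Int) (x : Bool) :
    pvNoneCnt (PySem.List.pySetD l i (some x)) ≤ pvNoneCnt l := by
  cases h : PySem.List.pyGet? l i with
  | none =>
    have : PySem.List.pySetD l i (some x) = l := by
      unfold PySem.List.pySetD
      have : PySem.List.pySet? l i (some x) = none := by
        rw [PySem.List.pySet?_eq_none_iff]
        rw [PySem.List.pyGet?_eq_none_iff] at h
        exact h
      simp [this]
    simp [this]
  | some a =>
    obtain ⟨k, hk, hget, hset⟩ := pv_get_set l i a h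
    rw [hset]
    unfold pvNoneCnt
    rw [List.countP_set hk]
    cases a <;> simp

theorem pv_len_setD (l : List (Option Bool)) (i : Int) (v : Option Bool) :
    (PySem.List.pySetD l i v).length = l.length := by
  unfold PySem.List.pySetD PySem.List.pySet?
  cases PySem.List.pyIdx? l.length i <;> simp


theorem pv_AM (f : Nat) :
    (∀ v c g st, pvNoneCnt (dfsA f v c g st).2.1 ≤ pvNoneCnt st.1 ∧
        (dfsA f v c g st).2.1.length = st.1.length) ∧
    (∀ v c g ns st, pvNoneCnt (loopA f v c g ns st).2.1 ≤ pvNoneCnt st.1 ∧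
        (loopA f v c g ns st).2.1.length = st.1.length) := by
  induction f with
  | zero =>
    refine ⟨fun v c g st => by simp [dfsA], ?_⟩
    intro v c g ns st
    induction ns generalizing st with
    | nil => simp [loopA]
    | cons nb rest ih =>
      simp only [loopA]
      cases hg : PySem.List.pyGet? st.1 nb with
      | none => simp
      | some a =>
        cases a with
        | none => simp [dfsA]
        | some b =>
          by_cases hb : b = c
          · simp [hb]
          · simpa [hb] using ih st
  | succ f ihf =>
    have hdfs : ∀ v c g st, pvNoneCnt (dfsA (f + 1) v c g st).2.1 ≤ pvNoneCnt st.1 ∧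
        (dfsA (f + 1) v c g st).2.1.length = st.1.length := by
      intro v c g st
      simp only [dfsA]
      obtain ⟨h1, h2⟩ := ihf.2 v c g (PySem.List.pyGetD g v [])
        (PySem.List.pySetD st.1 v (some c),
         (if c then (st.2.1.1 + 1, st.2.1.2) else (st.2.1.1, st.2.1.2 + 1)),
         st.2.2 ++ [v])
      exact ⟨le_trans h1 (pv_noneCnt_setD_le _ _ _), h2.trans (pv_len_setD _ _ _)⟩
    refine ⟨hdfs, ?_⟩
    intro v c g ns st
    induction ns generalizing st with
    | nil => simp [loopA]
    | cons nb rest ih =>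
      simp only [loopA]
      cases hg : PySem.List.pyGet? st.1 nb with
      | none => simp
      | some a =>
        cases a with
        | none =>
          simp only []
          obtain ⟨hd1, hd2⟩ := hdfs nb (!c) g st
          by_cases hr : (dfsA (f + 1) nb (!c) g st).1
          · simp only [hr, if_true]
            obtain ⟨hl1, hl2⟩ := ih (dfsA (f + 1) nb (!c) g st).2
            exact ⟨le_trans hl1 hd1, hl2.trans hd2⟩
          · simp only [hr]
            exact ⟨hd1, hd2⟩
        | some b =>
          by_cases hb : b = c
          · simp [hb]
          · simpa [hb] using ih st



theorem pv_noneCnt_pos (l : List (Option Bool)) (i : Int)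
    (h : PySem.List.pyGet? l i = some none) : 0 < pvNoneCnt l := by
  obtain ⟨k, hk, hget, -⟩ := pv_get_set l i none h
  exact List.countP_pos_iff.mpr ⟨none, by rw [← hget]; exact List.getElem_mem hk, rfl⟩

-- the stack machine simulates the recursion: one frame behaves as one dfs neighbor-loop
theorem pv_sim (g : List (List Int)) (f : Nat) :
    ∀ (v : Int) (c : Bool) (j : Nat) (st : PvSt) (rest : List (Int × Bool × Nat)),
      pvNoneCnt st.1 ≤ f →
      (((loopA f v c g ((PySem.List.pyGetD g v []).drop j) st).1 = true →
          runB g ((v, c, j) :: rest) st =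
            runB g rest (loopA f v c g ((PySem.List.pyGetD g v []).drop j) st).2) ∧
       ((loopA f v c g ((PySem.List.pyGetD g v []).drop j) st).1 = false →
          runB g ((v, c, j) :: rest) st =
            (false, (loopA f v c g ((PySem.List.pyGetD g v []).drop j) st).2))) := by
  induction f using Nat.strong_induction_on with
  | _ f IHf =>
  intro v c
  suffices H : ∀ (k : Nat) (j : Nat) (st : PvSt) (rest : List (Int × Bool × Nat)),
      (PySem.List.pyGetD g v []).length - j ≤ k → pvNoneCnt st.1 ≤ f →
      (((loopA f v c g ((PySem.List.pyGetD g v []).drop j) st).1 = true →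
          runB g ((v, c, j) :: rest) st =
            runB g rest (loopA f v c g ((PySem.List.pyGetD g v []).drop j) st).2) ∧
       ((loopA f v c g ((PySem.List.pyGetD g v []).drop j) st).1 = false →
          runB g ((v, c, j) :: rest) st =
            (false, (loopA f v c g ((PySem.List.pyGetD g v []).drop j) st).2))) by
    intro j st rest hf
    exact H ((PySem.List.pyGetD g v []).length - j) j st rest le_rfl hf
  intro k
  induction k with
  | zero =>
    intro j st rest hk hf
    have hj : ¬ j < (PySem.List.pyGetD g v []).length := by omega
    rw [List.drop_eq_nil_of_le (by omega)]
    refine ⟨fun _ => ?_, fun hfa => by simp [loopA] at hfa⟩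
    rw [runB]
    simp only [dif_neg hj, loopA]
  | succ k ihk =>
    intro j st rest hk hf
    by_cases hj : j < (PySem.List.pyGetD g v []).length
    · rw [List.drop_eq_getElem_cons hj]
      rw [runB]
      simp only [dif_pos hj]
      split
      next hg =>
        -- neighbor uncolored: the machine colors it and pushes a child frame, as dfs recursion does
        obtain ⟨f', rfl⟩ : ∃ f', f = f' + 1 := by
          have := pv_noneCnt_pos st.1 _ hg
          exact ⟨f - 1, by omega⟩
        simp only [loopA, hg, dfsA]
        set st1 : PvSt :=
          (PySem.List.pySetD st.1 ((PySem.List.pyGetD g v [])[j]) (some (!c)),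
           (if !c then (st.2.1.1 + 1, st.2.1.2) else (st.2.1.1, st.2.1.2 + 1)),
           st.2.2 ++ [(PySem.List.pyGetD g v [])[j]]) with hst1
        have hst1f : pvNoneCnt st1.1 ≤ f' := by
          have := pv_noneCnt_get_none st.1 _ hg (!c)
          simp only [hst1]
          omega
        have Hchild := IHf f' (Nat.lt_succ_self _) ((PySem.List.pyGetD g v [])[j]) (!c) 0
          st1 ((v, c, j + 1) :: rest) hst1f
        rw [List.drop_zero] at Hchild
        set r0 := loopA f' ((PySem.List.pyGetD g v [])[j]) (!c) g
          (PySem.List.pyGetD g ((PySem.List.pyGetD g v [])[j]) []) st1 with hr0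
        by_cases hr : r0.1
        · simp only [hr]
          rw [Hchild.1 hr]
          have hr02 : pvNoneCnt r0.2.1 ≤ f' + 1 := by
            have hm := ((pv_AM f').2 ((PySem.List.pyGetD g v [])[j]) (!c) g
              (PySem.List.pyGetD g ((PySem.List.pyGetD g v [])[j]) []) st1).1
            rw [← hr0] at hm
            omega
          exact ihk (j + 1) r0.2 rest (by omega) hr02
        · simp only [hr]
          rw [Hchild.2 (by simpa using hr)]
          simp
      next b hg =>
        by_cases hb : b = c
        · have hl : loopA f v c g
              ((PySem.List.pyGetD g v [])[j] :: List.drop (j + 1) (PySem.List.pyGetD g v [])) st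
              = (false, st) := by
            simp only [loopA, hg]; rw [if_pos hb]
          rw [hl]
          refine ⟨fun h => absurd h (by simp), fun _ => by rw [if_pos hb]⟩
        · have hl : loopA f v c g
              ((PySem.List.pyGetD g v [])[j] :: List.drop (j + 1) (PySem.List.pyGetD g v [])) st
              = loopA f v c g (List.drop (j + 1) (PySem.List.pyGetD g v [])) st := by
            simp only [loopA, hg, if_neg hb]
          rw [hl]
          simp only [if_neg hb]
          exact ihk (j + 1) st rest (by omega) hf
      next hg =>
        -- IndexError branch: both sides fail
        have hl : loopA f v c g
            ((PySem.List.pyGetD g v [])[j] :: List.drop (j + 1) (PySem.List.pyGetD g v [])) st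
            = (false, st) := by
          simp only [loopA, hg]
        rw [hl]
        exact ⟨fun h => absurd h (by simp), fun _ => rfl⟩
    · rw [List.drop_eq_nil_of_le (by omega)]
      refine ⟨fun _ => ?_, fun hfa => by simp [loopA] at hfa⟩
      rw [runB]
      simp only [dif_neg hj, loopA]



theorem pv_flip_eq (comp : List Int) (col : List (Option Bool)) :
    flipB comp col = flipA col comp := by
  induction comp generalizing col with
  | nil => rfl
  | cons node rest ih => simp only [flipB, flipA, List.foldl_cons] at *; exact ih _



theorem pv_len_flipA (comp : List Int) (col : List (Option Bool)) :
    (flipA col comp).length = col.length := by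
  induction comp generalizing col with
  | nil => rfl
  | cons node rest ih =>
    simp only [flipA, List.foldl_cons] at *
    rw [ih, pv_len_setD]



theorem pv_adjB_eq (n : Int) (edges : List (Int × Int)) :
    adjB (List.replicate n.toNat []) edges = buildAdj n edges := by
  unfold buildAdj
  generalize List.replicate n.toNat ([] : List Int) = g
  induction edges generalizing g with
  | nil => rfl
  | cons e rest ih => cases e; simp only [adjB, List.foldl_cons]; exact ih _



theorem pv_flipStep_eq (st : PvSt) : flipStepB st = flipStepA st := by
  unfold flipStepA flipStepB
  rw [pv_flip_eq]

theorem pv_len_flipStepA (st : PvSt) : (flipStepA st).1.length = st.1.length := by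
  unfold flipStepA
  split
  · exact pv_len_flipA _ _
  · rfl

theorem pv_step_eq (g : List (List Int)) (N : Nat) (acc : Bool × PvSt) (i : Int)
    (hlen : acc.2.1.length = N) :
    stepA g (N + 1) acc i = stepB g acc i := by
  unfold stepA stepB
  by_cases ha : acc.1
  · simp only [ha]
    cases hg : PySem.List.pyGet? acc.2.1 i with
    | none => rfl
    | some a =>
      cases a with
      | some b => simp [pv_flipStep_eq]
      | none =>
        simp only []
        have hd : dfsA (N + 1) i false g (acc.2.1, (0, 0), []) =
            loopA N i false g (PySem.List.pyGetD g i [])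
              (PySem.List.pySetD acc.2.1 i (some false), (0, 1), [i]) := by
          simp [dfsA]
        have hf : pvNoneCnt (PySem.List.pySetD acc.2.1 i (some false), (0, 1), ([i] : List Int)).1 ≤ N := by
          have h1 := pv_noneCnt_get_none acc.2.1 i hg false
          have h2 : pvNoneCnt acc.2.1 ≤ acc.2.1.length := List.countP_le_length
          simp only []
          omega
        have Hs := pv_sim g N i false 0
          (PySem.List.pySetD acc.2.1 i (some false), (0, 1), [i]) [] hf
        rw [List.drop_zero] at Hs
        set r0 := loopA N i false g (PySem.List.pyGetD g i [])
          (PySem.List.pySetD acc.2.1 i (some false), (0, 1), [i]) with hr0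
        by_cases hr : r0.1
        · rw [hd, Hs.1 hr]
          simp only [runB]
          simp [hr, pv_flipStep_eq]
        · rw [hd, Hs.2 (by simpa using hr)]
          simp [hr]
  · simp [ha]


theorem pv_len_stepA (g : List (List Int)) (fuel : Nat) (acc : Bool × PvSt) (i : Int) :
    (stepA g fuel acc i).2.1.length = acc.2.1.length := by
  unfold stepA
  by_cases ha : acc.1
  · simp only [ha]
    cases hg : PySem.List.pyGet? acc.2.1 i with
    | none => simp
    | some a =>
      cases a with
      | some b => simp [pv_len_flipStepA]
      | none =>
        simp only []
        have hlen := ((pv_AM fuel).1 i false g (acc.2.1, (0, 0), [])).2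
        by_cases hr : (dfsA fuel i false g (acc.2.1, (0, 0), [])).1
        · simp only [hr]
          simpa [pv_len_flipStepA] using hlen
        · simp only [hr]
          simpa using hlen
  · simp [ha]


theorem pv_outer_eq (g : List (List Int)) (N : Nat) :
    ∀ (l : List Int) (acc : Bool × PvSt), acc.2.1.length = N →
      l.foldl (stepA g (N + 1)) acc = outerB g l acc := by
  intro l
  induction l with
  | nil => intro acc _; rfl
  | cons i is ih =>
    intro acc hlen
    simp only [List.foldl_cons, outerB]
    rw [← pv_step_eq g N acc i hlen]
    exact ih _ ((pv_len_stepA g (N + 1) acc i).trans hlen)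


-- ===== VERDICT (by name: the statement is the Claim_ definition above) =====
theorem least_red_spec : Claim_equal_least_red := by
  intro n edges _ _
  unfold Spec_least_red least_red least_red_alt
  dsimp only
  rw [pv_adjB_eq]
  rw [pv_outer_eq (buildAdj n edges) n.toNat (PySem.List.pyRange 0 n 1)
    (true, (List.replicate n.toNat none, (0, 0), [])) (by simp)]
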